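-- pv_equiv track=rewrite | github.com/lefarov/cp_playground | practice/meta/slippery_trip.py | getMaxCollectableCoins
-- ===== SOURCE A (Python) =====
-- from typing import List
-- from collections import defaultdict, Counter
--
-- def getMaxCollectableCoins(R: int, C: int, G: List[List[str]]) -> int:
--     # Write your code here
--     subsolutions = defaultdict(int)
--
--     for inverse_ind, row in enumerate(G[::-1]):
--         ind = R - inverse_ind - 1
--
--         row_chars = Counter(row)
--         max_coins_between_turns = getNumCoinsBetweenTurns(row, C)
--
--         coins_enter, coins_skip = 0, 0
--         if row_chars[">"] > 0:
--             if row_chars["v"] > 0: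
--                 coins_enter = subsolutions[ind + 1] + max_coins_between_turns
--             else:
--                 coins_enter = row_chars["*"]
--
--         if row_chars["."] > 0 or row_chars["*"] > 0:
--             coins_skip = subsolutions[ind + 1] + 1 if row_chars["*"] > 0 else 0
--
--         subsolutions[ind] = max(coins_skip, coins_enter)
--
--     return subsolutions[0]
--
-- def getNumCoinsBetweenTurns(row, C):
--     i, j = 0, 0
--     max_coins = 0
--     while i < C:
--         if row[i] == ">":
--             coins = 0
--             j = (i + 1) % C
--             while row[j] != "v" and j != i:
--                 if row[j] == "*":
--                     coins += 1
--
--                 j = (j + 1) % C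
--
--             if row[j] == "v":
--                 max_coins = max(coins, max_coins)
--
--             if j > i:
--                 i = j + 1
--                 continue
--             else:
--                 break
--
--         i += 1
--
--     return max_coins
-- ===== SOURCE B (Python) =====
-- def getMaxCollectableCoins(R, C, G):
--     # No valid trip if the stated row count is not within the grid.
--     if R <= 0 or R > len(G):
--         return 0
--     best_above = 0
--     for row in reversed(G[len(G) - R:]):
--         enter = 0
--         if ">" in row:
--             if "v" in row:
--                 enter = best_above + _maxRunCoins(row, C)
--             else:
--                 enter = row.count("*")
--         skip = best_above + 1 if "*" in row else 0
--         best_above = max(skip, enter)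
--     return best_above
--
--
-- def _maxRunCoins(row, C):
--     # best over '>' positions i < C of: number of '*' strictly between i and the
--     # next 'v' (circularly, within the first C cells); runs with no 'v' don't count
--     s = row[:C]
--     t = s + s
--     best = 0
--     for i in range(C):
--         if s[i] == ">":
--             seg = t[i + 1 : i + C]
--             if "v" in seg:
--                 best = max(best, seg[: seg.index("v")].count("*"))
--     return best
-- ===== Notes on version B (the rewrite author's own statement) =====
-- stated objective: simpler
-- what changed: The per-row helper's index-jumping double while loop (restart at j+1, break on wrap-around) is replaced by one pass over the '>' cells that counts stars to the next 'v' on the doubled row prefix via slicing, and the defaultdict DP keyed by R-derived indices is replaced by an up-front range check on R plus a single-accumulator fold over the bottom R rows.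
import Mathlib
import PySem

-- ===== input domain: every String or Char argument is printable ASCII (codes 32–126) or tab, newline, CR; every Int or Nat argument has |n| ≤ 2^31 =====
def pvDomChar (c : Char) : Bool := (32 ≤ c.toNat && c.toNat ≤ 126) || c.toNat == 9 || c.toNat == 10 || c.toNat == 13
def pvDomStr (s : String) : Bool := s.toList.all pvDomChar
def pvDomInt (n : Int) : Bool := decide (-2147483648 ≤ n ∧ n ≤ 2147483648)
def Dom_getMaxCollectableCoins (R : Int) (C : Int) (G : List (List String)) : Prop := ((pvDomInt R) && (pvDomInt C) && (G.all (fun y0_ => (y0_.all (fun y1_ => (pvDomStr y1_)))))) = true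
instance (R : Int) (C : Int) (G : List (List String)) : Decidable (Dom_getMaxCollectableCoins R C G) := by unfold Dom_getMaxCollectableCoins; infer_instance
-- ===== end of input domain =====

-- B rewrite: the per-row helper drops A's index-jumping double `while` (restart at
-- j+1 / break on wrap) for a slice-based scan of each '>' on the doubled row, and the
-- main DP replaces the defaultdict keyed by R-derived indices with an up-front range
-- check on R plus a single-accumulator fold over the bottom R rows; objective: simpler,
-- same exact values.

-- ===== PORT A =====
-- row[j] for a possibly out-of-range Int index; inside Pre_ every index used is in range
def pvGetA (row : List String) (j : Int) : String := (PySem.List.pyGet? row j).getD ""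

-- inner `while row[j] != "v" and j != i:` loop of getNumCoinsBetweenTurns; fuel makes it total
def pvInner (row : List String) (C : Int) (i : Int) : Int → Int → Nat → Int × Int
  | j, coins, 0 => (j, coins)
  | j, coins, fuel + 1 =>
    if pvGetA row j ≠ "v" ∧ j ≠ i then
      pvInner row C i (PySem.Int.mod (j + 1) C)
        (if pvGetA row j = "*" then coins + 1 else coins) fuel
    else (j, coins)

-- outer `while i < C:` loop of getNumCoinsBetweenTurns
def pvOuter (row : List String) (C : Int) : Int → Int → Nat → Int
  | _, maxCoins, 0 => maxCoins
  | i, maxCoins, fuel + 1 =>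
    if i < C then
      if pvGetA row i = ">" then
        let jc := pvInner row C i (PySem.Int.mod (i + 1) C) 0 (C.toNat + 1)
        let maxCoins' := if pvGetA row jc.1 = "v" then max jc.2 maxCoins else maxCoins
        if i < jc.1 then pvOuter row C (jc.1 + 1) maxCoins' fuel else maxCoins'
      else pvOuter row C (i + 1) maxCoins fuel
    else maxCoins

def getNumCoinsBetweenTurns (row : List String) (C : Int) : Int :=
  pvOuter row C 0 0 (C.toNat + 1)

def getMaxCollectableCoins (R : Int) (C : Int) (G : List (List String)) : Int :=
  let d := (PySem.List.enumerate ((PySem.List.slice? G none none (-1)).getD []) 0).foldl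
    (init := (PySem.Dict.empty : PySem.Dict Int Int)) (fun d p =>
      let ind := R - p.1 - 1
      let rowChars := PySem.Dict.counter p.2
      let maxCoinsBetweenTurns := getNumCoinsBetweenTurns p.2 C
      let coinsEnter : Int :=
        if 0 < rowChars.getD ">" 0 then
          if 0 < rowChars.getD "v" 0 then d.getD (ind + 1) 0 + maxCoinsBetweenTurns
          else rowChars.getD "*" 0
        else 0
      let coinsSkip : Int :=
        if 0 < rowChars.getD "." 0 ∨ 0 < rowChars.getD "*" 0 then
          if 0 < rowChars.getD "*" 0 then d.getD (ind + 1) 0 + 1 else 0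
        else 0
      d.insert ind (max coinsSkip coinsEnter))
  d.getD 0 0

-- ===== PORT B =====
-- s[i] for a possibly out-of-range Int index (B's own copy of the indexing shim)
def pvGetB (s : List String) (j : Int) : String := (PySem.List.pyGet? s j).getD ""

-- best over '>' positions i < C of the number of '*' strictly between i and the next
-- 'v' circularly (scan done on the doubled prefix s ++ s); runs without a 'v' don't count
def pvMaxRunCoins (row : List String) (C : Int) : Int :=
  let s := PySem.List.slice row none (some C)
  let t := s ++ s
  (PySem.List.pyRange 0 C 1).foldl
    (fun best i =>
      if pvGetB s i = ">" then
        let seg := PySem.List.slice t (some (i + 1)) (some (i + C))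
        if seg.contains "v" then
          max best ((PySem.List.count
            (PySem.List.slice seg none (some (((PySem.List.index? seg "v").getD 0 : Nat) : Int)))
            "*" : Int))
        else best
      else best) 0

def getMaxCollectableCoins_alt (R : Int) (C : Int) (G : List (List String)) : Int :=
  if R ≤ 0 ∨ (G.length : Int) < R then 0
  else
    ((PySem.List.slice G (some ((G.length : Int) - R)) none).reverse).foldl
      (fun best_above row =>
        let enter : Int :=
          if row.contains ">" then
            if row.contains "v" then best_above + pvMaxRunCoins row C
            else (PySem.List.count row "*" : Int)
          else 0
        let skip : Int := if row.contains "*" then best_above + 1 else 0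
        max skip enter) 0

-- ===== PRECONDITION & SPEC =====
-- A raises IndexError exactly when 0 < C and some row is shorter than C (the scan of a
-- row always reaches cell index len(row) then); Pre_ excludes exactly those inputs.
def Pre_getMaxCollectableCoins (R : Int) (C : Int) (G : List (List String)) : Prop :=
  ∀ row ∈ G, 0 < C → C ≤ (row.length : Int)
instance (R : Int) (C : Int) (G : List (List String)) : Decidable (Pre_getMaxCollectableCoins R C G) := by
  unfold Pre_getMaxCollectableCoins; infer_instance

def pvWitness_getMaxCollectableCoins : Int × Int × List (List String) :=
  (2, 3, [[".", "*", "v"], [">", "*", "v"]])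

def Spec_getMaxCollectableCoins (R : Int) (C : Int) (G : List (List String)) (out : Int) : Prop := out = getMaxCollectableCoins_alt R C G
instance (R : Int) (C : Int) (G : List (List String)) (out : Int) : Decidable (Spec_getMaxCollectableCoins R C G out) := by unfold Spec_getMaxCollectableCoins; infer_instance

-- ===== CLAIM (what is proved, stated in full; the proofs are below) =====
def Claim_equal_getMaxCollectableCoins : Prop := ∀ (R : Int) (C : Int) (G : List (List String)), Dom_getMaxCollectableCoins R C G → Pre_getMaxCollectableCoins R C G → Spec_getMaxCollectableCoins R C G (getMaxCollectableCoins R C G)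

-- ===== LEMMAS AND PROOFS =====

-- ---- proof-side view of one row: s = row.take C.toNat, Nat positions ----

-- s[q] for proof-side Nat positions
def pvSG (s : List String) (q : Nat) : String := s.getD q ""

-- the circular scan order of cells visited from position i (all cells except i itself)
def pvPath (s : List String) (i : Nat) : List Nat :=
  List.range' (i + 1) (s.length - 1 - i) ++ List.range' 0 i

-- cell where the scan from i stops: the first 'v' on the path, else i itself
def pvStop (s : List String) (i : Nat) : Nat :=
  (((pvPath s i).dropWhile (fun q => pvSG s q ≠ "v")).head?).getD i

-- number of '*' seen before stopping
def pvStars (s : List String) (i : Nat) : Int :=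
  (((pvPath s i).takeWhile (fun q => pvSG s q ≠ "v")).countP (fun q => pvSG s q = "*") : Int)

-- one step of the reference fold: record a '>' whose scan ends on a 'v'
def pvFoldStep (s : List String) (b : Int) (q : Nat) : Int :=
  if pvSG s q = ">" ∧ pvSG s (pvStop s q) = "v" then max b (pvStars s q) else b

-- common reference value of the per-row helper
def pvRef (s : List String) : Int := (List.range' 0 s.length).foldl (pvFoldStep s) 0

-- ---- generic list facts ----

theorem pvSplitTW {α : Type} (p : α → Bool) (l1 : List α) (x : α) (l2 : List α)
    (h1 : ∀ a ∈ l1, p a) (h2 : ¬ p x = true) :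
    (l1 ++ x :: l2).takeWhile p = l1 ∧ (l1 ++ x :: l2).dropWhile p = x :: l2 := by
  induction l1 with
  | nil => simp [List.takeWhile, List.dropWhile, h2]
  | cons a t ih =>
    have ha : p a = true := h1 a (by simp)
    have := ih (fun b hb => h1 b (by simp [hb]))
    simp [List.takeWhile, List.dropWhile, ha, this.1, this.2]

theorem pvDWdecomp {α : Type} (p : α → Bool) (l : List α) (h : l.dropWhile p ≠ []) :
    ∃ x l2, l = l.takeWhile p ++ x :: l2 ∧ (∀ a ∈ l.takeWhile p, p a) ∧
      ¬ p x = true ∧ l.dropWhile p = x :: l2 := by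
  induction l with
  | nil => simp at h
  | cons a t ih =>
    by_cases ha : p a = true
    · have h' : t.dropWhile p ≠ [] := by simpa [List.dropWhile, ha] using h
      obtain ⟨x, l2, he, htw, hx, hdw⟩ := ih h'
      exact ⟨x, l2, by simpa [List.takeWhile, ha] using congrArg (a :: ·) he,
        by simpa [List.takeWhile, ha] using htw, hx, by simpa [List.dropWhile, ha] using hdw⟩
    · exact ⟨a, t, by simp [List.takeWhile, ha], by simp [List.takeWhile, ha],
        ha, by simp [List.dropWhile, ha]⟩

theorem pvFirstSplit {α : Type} (x : α) :
    ∀ (a c b d : List α), a ++ x :: b = c ++ x :: d → x ∉ a → x ∉ c → a = c ∧ b = d := by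
  intro a
  induction a with
  | nil =>
    intro c b d h hxa hxc
    cases c with
    | nil => simpa using h
    | cons y c' =>
      simp at h
      exact absurd (h.1 ▸ (by simp : x ∈ x :: c' ++ x :: d)) (by simpa [h.1] using hxc)
  | cons y a' ih =>
    intro c b d h hxa hxc
    cases c with
    | nil =>
      simp at h
      exact absurd (h.1 ▸ (by simp : x ∈ x :: a' ++ x :: b)) (by simpa [h.1] using hxa)
    | cons z c' =>
      simp at h
      obtain ⟨h1, h2⟩ := ih c' b d h.2 (fun hm => hxa (by simp [hm])) (fun hm => hxc (by simp [hm]))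
      exact ⟨by simp [h.1, h1], h2⟩

-- ---- facts about pvPath / pvStop / pvStars ----

theorem pvMemPath (s : List String) (i : Nat) (hi : i < s.length) (q : Nat) :
    q ∈ pvPath s i ↔ q < s.length ∧ q ≠ i := by
  simp only [pvPath, List.mem_append, List.mem_range'_1]
  omega

theorem pvStopLt (s : List String) (i : Nat) (hi : i < s.length) : pvStop s i < s.length := by
  unfold pvStop
  cases hdw : (pvPath s i).dropWhile (fun q => pvSG s q ≠ "v") with
  | nil => simpa using hi
  | cons x l2 =>
    have hx : x ∈ pvPath s i :=
      (List.dropWhile_sublist _).subset (by rw [hdw]; exact List.mem_cons_self ..)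
    simpa using ((pvMemPath s i hi x).mp hx).1

-- ---- the inner while loop of A computes the walk along pvPath ----

def pvChainE (C : Int) (n i e : Nat) : List Nat → Int → Prop
  | [], j => j = (e : Int)
  | q :: ps, j => j = (q : Int) ∧ q < n ∧ q ≠ i ∧
      pvChainE C n i e ps (PySem.Int.mod ((q : Int) + 1) C)

def pvWalk (s : List String) (i : Nat) : List Nat → Int → Nat × Int
  | [], coins => (i, coins)
  | q :: ps, coins =>
    if pvSG s q = "v" then (q, coins)
    else pvWalk s i ps (if pvSG s q = "*" then coins + 1 else coins)

theorem pvGetA_eq (row : List String) (n q : Nat) (hq : q < n) (hn : n ≤ row.length) :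
    pvGetA row (q : Int) = pvSG (row.take n) q := by
  simp [pvGetA, pvSG, PySem.List.pyGet?_natCast, List.getD, hq]

theorem pvChainAppend (C : Int) (n i e1 e2 : Nat) :
    ∀ (l1 : List Nat) (j : Int), pvChainE C n i e1 l1 j →
      ∀ l2, pvChainE C n i e2 l2 (e1 : Int) → pvChainE C n i e2 (l1 ++ l2) j := by
  intro l1
  induction l1 with
  | nil => intro j h l2 h2; simp only [pvChainE] at h; simpa [h] using h2
  | cons q t ih =>
    intro j h l2 h2
    obtain ⟨hj, hq, hqi, hrest⟩ := h
    exact ⟨hj, hq, hqi, ih _ hrest l2 h2⟩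

theorem pvChainRange' (C : Int) (n i : Nat) (hC : C = (n : Int)) (hn : 0 < n) :
    ∀ (k a : Nat), a + k ≤ n → (∀ q, a ≤ q → q < a + k → q ≠ i) →
      pvChainE C n i ((a + k) % n) (List.range' a k) ((a % n : Nat) : Int) := by
  intro k
  induction k with
  | zero => intro a _ _; simp [pvChainE, List.range']
  | succ k ih =>
    intro a hak hne
    have ha : a < n := by omega
    refine ⟨by rw [Nat.mod_eq_of_lt ha], ha, hne a le_rfl (by omega), ?_⟩
    have hm : PySem.Int.mod ((a : Int) + 1) C = (((a + 1) % n : Nat) : Int) := by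
      rw [hC]
      exact_mod_cast PySem.Int.mod_natCast (a + 1) n
    rw [hm]
    have := ih (a + 1) (by omega) (fun q h1 h2 => hne q (by omega) (by omega))
    rw [show a + (k + 1) = (a + 1) + k by omega]
    exact this

theorem pvChainPath (C : Int) (n i : Nat) (s : List String) (hC : C = (n : Int))
    (hi : i < n) (hs : s.length = n) :
    pvChainE C n i i (pvPath s i) (PySem.Int.mod ((i : Int) + 1) C) := by
  have h1 := pvChainRange' C n i hC (by omega) (n - 1 - i) (i + 1) (by omega)
    (fun q h1 h2 => by omega)
  have h2 := pvChainRange' C n i hC (by omega) i 0 (by omega) (fun q h1 h2 => by omega)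
  have he1 : (i + 1 + (n - 1 - i)) % n = 0 := by
    rw [show i + 1 + (n - 1 - i) = n by omega, Nat.mod_self]
  have he2 : (0 + i) % n = i := by simpa using Nat.mod_eq_of_lt hi
  rw [he1] at h1; rw [he2] at h2
  have hstart : PySem.Int.mod ((i : Int) + 1) C = (((i + 1) % n : Nat) : Int) := by
    rw [hC]; exact_mod_cast PySem.Int.mod_natCast (i + 1) n
  have h2' : pvChainE C n i i (List.range' 0 i) ((0 : Nat) : Int) := by simpa using h2
  have := pvChainAppend C n i 0 i _ _ h1 _ h2'
  rw [pvPath, hs, hstart]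
  simpa using this

theorem pvInnerEqWalk (row : List String) (C : Int) (n i : Nat) (hC : C = (n : Int))
    (hn : n ≤ row.length) :
    ∀ (ps : List Nat) (j coins : Int) (fuel : Nat), ps.length < fuel →
      pvChainE C n i i ps j →
      pvInner row C i j coins fuel =
        (((pvWalk (row.take n) i ps coins).1 : Int), (pvWalk (row.take n) i ps coins).2) := by
  intro ps
  induction ps with
  | nil =>
    intro j coins fuel hfuel hch
    obtain ⟨fuel, rfl⟩ : ∃ f, fuel = f + 1 := ⟨fuel - 1, by omega⟩
    simp only [pvChainE] at hch
    subst hch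
    simp [pvInner, pvWalk]
  | cons q ps ih =>
    intro j coins fuel hfuel hch
    obtain ⟨fuel, rfl⟩ : ∃ f, fuel = f + 1 := ⟨fuel - 1, by omega⟩
    obtain ⟨rfl, hq, hqi, hrest⟩ := hch
    rw [pvInner]
    rw [pvGetA_eq row n q hq hn]
    by_cases hv : pvSG (row.take n) q = "v"
    · simp [pvWalk, hv]
    · have hne : ((q : Int) ≠ (i : Int)) := by exact_mod_cast hqi
      rw [if_pos ⟨hv, hne⟩]
      rw [ih _ _ fuel (by simpa using Nat.lt_of_succ_lt_succ hfuel) hrest]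
      simp [pvWalk, hv]

theorem pvWalkSpec (s : List String) (i : Nat) :
    ∀ (ps : List Nat) (coins : Int),
      pvWalk s i ps coins =
        ((((ps.dropWhile (fun q => pvSG s q ≠ "v")).head?).getD i,
          coins + ((ps.takeWhile (fun q => pvSG s q ≠ "v")).countP
            (fun q => pvSG s q = "*") : Int))) := by
  intro ps
  induction ps with
  | nil => intro coins; simp [pvWalk]
  | cons q t ih =>
    intro coins
    by_cases hv : pvSG s q = "v"
    · simp [pvWalk, hv]
    · by_cases hst : pvSG s q = "*" <;>
        simp [pvWalk, hv, hst, List.countP_cons, ih] <;> push_cast <;> ring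

theorem pvInnerFull (row : List String) (C : Int) (n i : Nat) (hC : C = (n : Int))
    (hn : n ≤ row.length) (hi : i < n) :
    pvInner row C i (PySem.Int.mod ((i : Int) + 1) C) 0 (C.toNat + 1) =
      (((pvStop (row.take n) i : Nat) : Int), pvStars (row.take n) i) := by
  have hs : (row.take n).length = n := by
    rw [List.length_take]; omega
  have hch := pvChainPath C n i (row.take n) hC hi hs
  have hfuel : (pvPath (row.take n) i).length < C.toNat + 1 := by
    rw [hC]
    simp only [pvPath, List.length_append, List.length_range', hs, Int.toNat_natCast]
    omega
  rw [pvInnerEqWalk row C n i hC hn _ _ 0 _ hfuel hch, pvWalkSpec]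
  simp [pvStop, pvStars]

-- ---- the outer while loop of A computes the reference fold ----

theorem pvFoldStepConst (s : List String) :
    ∀ (l : List Nat) (b : Int),
      (∀ q ∈ l, (pvSG s q = ">" ∧ pvSG s (pvStop s q) = "v") → pvStars s q ≤ b) →
      l.foldl (pvFoldStep s) b = b := by
  intro l
  induction l with
  | nil => intro b _; rfl
  | cons q t ih =>
    intro b h
    rw [List.foldl_cons]
    have hstep : pvFoldStep s b q = b := by
      unfold pvFoldStep
      split_ifs with hc
      · exact max_eq_left (h q (by simp) hc)
      · rfl
    rw [hstep]
    exact ih b (fun q' hq' => h q' (by simp [hq']))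

theorem pvStarsMono (s : List String) (n : Nat) (hs : s.length = n) (i q jN : Nat)
    (hi : i < n) (hq : q < n) (hiq : i < q) (hjN : jN < n) (hv : pvSG s jN = "v")
    (htw : (pvPath s i).takeWhile (fun p => pvSG s p ≠ "v") =
      (if i < jN then List.range' (i + 1) (jN - i - 1)
       else List.range' (i + 1) (n - 1 - i) ++ List.range' 0 jN))
    (hcase : if i < jN then q < jN else jN < i) :
    pvStars s q ≤ pvStars s i := by
  by_cases hij : i < jN
  · rw [if_pos hij] at htw hcase
    have hchars : ∀ p ∈ List.range' (q + 1) (jN - q - 1),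
        (fun p => decide (pvSG s p ≠ "v")) p = true := by
      intro p hp
      have hp' : p ∈ (pvPath s i).takeWhile (fun q => pvSG s q ≠ "v") := by
        rw [htw]
        rw [List.mem_range'_1] at hp ⊢
        omega
      simpa using List.mem_takeWhile_imp hp'
    have hdecomp : pvPath s q = List.range' (q + 1) (jN - q - 1) ++ jN ::
        (List.range' (jN + 1) (n - 1 - jN) ++ List.range' 0 q) := by
      rw [pvPath, hs]
      rw [show n - 1 - q = (jN - q - 1) + ((n - 1 - jN) + 1) by omega,
        ← List.range'_append_1, List.range'_succ,
        show q + 1 + (jN - q - 1) = jN by omega, List.append_assoc]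
      simp
    have htwq := pvSplitTW (fun p => decide (pvSG s p ≠ "v")) _ jN
      (List.range' (jN + 1) (n - 1 - jN) ++ List.range' 0 q) hchars (by simp [hv])
    rw [pvStars, pvStars, htw, hdecomp, htwq.1]
    have hsplit : List.range' (i + 1) (jN - i - 1) =
        List.range' (i + 1) (q - i) ++ List.range' (q + 1) (jN - q - 1) := by
      rw [show q + 1 = (i + 1) + (q - i) by omega, List.range'_append_1]
      congr 1
      omega
    rw [hsplit, List.countP_append]
    push_cast
    omega
  · rw [if_neg hij] at htw hcase
    have hchars : ∀ p ∈ List.range' (q + 1) (n - 1 - q) ++ List.range' 0 jN,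
        (fun p => decide (pvSG s p ≠ "v")) p = true := by
      intro p hp
      have hp' : p ∈ (pvPath s i).takeWhile (fun q => pvSG s q ≠ "v") := by
        rw [htw, List.mem_append, List.mem_range'_1, List.mem_range'_1]
        rw [List.mem_append, List.mem_range'_1, List.mem_range'_1] at hp
        omega
      simpa using List.mem_takeWhile_imp hp'
    have hdecomp : pvPath s q = (List.range' (q + 1) (n - 1 - q) ++ List.range' 0 jN) ++ jN ::
        List.range' (jN + 1) (q - jN - 1) := by
      rw [pvPath, hs]
      rw [show (List.range' 0 q : List Nat) = List.range' 0 (jN + ((q - jN - 1) + 1)) by congr 1; omega,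
        ← List.range'_append_1, List.range'_succ, List.append_assoc]
      simp [show 0 + jN = jN by omega]
    have htwq := pvSplitTW (fun p => decide (pvSG s p ≠ "v")) _ jN
      (List.range' (jN + 1) (q - jN - 1)) hchars (by simp [hv])
    rw [pvStars, pvStars, htw, hdecomp, htwq.1]
    have hsplit : List.range' (i + 1) (n - 1 - i) =
        List.range' (i + 1) (q - i) ++ List.range' (q + 1) (n - 1 - q) := by
      rw [show q + 1 = (i + 1) + (q - i) by omega, List.range'_append_1]
      congr 1
      omega
    rw [hsplit]
    simp only [List.countP_append]
    push_cast
    omega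

theorem pvOuterSpec (row : List String) (C : Int) (n : Nat) (hC : C = (n : Int))
    (hn : n ≤ row.length) :
    ∀ (fuel i : Nat) (m : Int), i ≤ n → n - i ≤ fuel →
      pvOuter row C (i : Int) m fuel =
        (List.range' i (n - i)).foldl (pvFoldStep (row.take n)) m := by

  have hs : (row.take n).length = n := by rw [List.length_take]; omega
  intro fuel
  induction fuel with
  | zero =>
    intro i m hin hfuel
    have : i = n := by omega
    subst this
    simp [pvOuter]
  | succ fuel ih =>
    intro i m hin hfuel
    by_cases hin2 : i < n
    · have hiC : (i : Int) < C := by rw [hC]; exact_mod_cast hin2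
      rw [pvOuter, if_pos hiC, pvGetA_eq row n i hin2 hn]
      by_cases hgt : pvSG (row.take n) i = ">"
      · rw [if_pos hgt, pvInnerFull row C n i hC hn hin2]
        set s := row.take n with hsdef
        set jN := pvStop s i with hjdef
        simp only
        rw [pvGetA_eq row n jN (by rw [← hs]; exact pvStopLt s i (by omega)) hn]
        by_cases hv : pvSG s jN = "v"
        · -- scan found a 'v'
          have hdw : (pvPath s i).dropWhile (fun q => pvSG s q ≠ "v") ≠ [] := by
            intro hnil
            rw [hjdef, pvStop, hnil] at hv
            simp at hv
            exact absurd hv (by rw [hgt]; decide)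
          obtain ⟨x, l2, hsplit, htwp, hxp, hdwx⟩ :=
            pvDWdecomp (fun q => pvSG s q ≠ "v") (pvPath s i) hdw
          have hxj : x = jN := by rw [hjdef, pvStop, hdwx]; rfl
          subst hxj
          have hjmem : jN ∈ pvPath s i := by
            rw [hsplit]; exact List.mem_append_right _ (by simp)
          have hjn : jN < n ∧ jN ≠ i := by
            have := (pvMemPath s i (by omega) jN).mp hjmem
            omega
          have hjtw : jN ∉ (pvPath s i).takeWhile (fun q => pvSG s q ≠ "v") := by
            intro hmem
            have := htwp jN hmem
            simp [hv] at this
          by_cases hij : i < jN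
          · -- forward case: continue at jN + 1
            have hdecomp : pvPath s i = List.range' (i + 1) (jN - i - 1) ++ jN ::
                (List.range' (jN + 1) (n - 1 - jN) ++ List.range' 0 i) := by
              rw [pvPath, hs]
              rw [show n - 1 - i = (jN - i - 1) + ((n - 1 - jN) + 1) by omega,
                ← List.range'_append_1, List.range'_succ,
                show i + 1 + (jN - i - 1) = jN by omega, List.append_assoc]
              simp
            have htw : (pvPath s i).takeWhile (fun q => pvSG s q ≠ "v") =
                List.range' (i + 1) (jN - i - 1) := by
              have := pvFirstSplit jN _ _ _ _ (hsplit.symm.trans hdecomp) hjtw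
                (by rw [List.mem_range'_1]; omega)
              exact this.1
            have hvj : ((i : Int) < (jN : Int)) := by exact_mod_cast hij
            rw [if_pos hv, if_pos hvj]
            have hcast : ((jN : Int) + 1) = ((jN + 1 : Nat) : Int) := by push_cast; ring
            rw [hcast, ih (jN + 1) _ (by omega) (by omega)]
            -- fold decomposition
            have hr : List.range' i (n - i) = i ::
                (List.range' (i + 1) (jN - i) ++ List.range' (jN + 1) (n - 1 - jN)) := by
              rw [show n - i = ((jN - i) + (n - 1 - jN)) + 1 by omega, List.range'_succ]
              congr 1
              rw [show jN + 1 = (i + 1) + (jN - i) by omega, List.range'_append_1]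
            rw [hr, List.foldl_cons, List.foldl_append]
            have hstep : pvFoldStep s m i = max m (pvStars s i) := by
              unfold pvFoldStep
              rw [if_pos ⟨hgt, by rw [← hjdef]; exact hv⟩]
            rw [hstep]
            have hconst : (List.range' (i + 1) (jN - i)).foldl (pvFoldStep s)
                (max m (pvStars s i)) = max m (pvStars s i) := by
              apply pvFoldStepConst
              intro q hq hc
              rw [List.mem_range'_1] at hq
              rcases Nat.lt_or_ge q jN with hqj | hqj
              · exact le_trans (pvStarsMono s n hs i q jN (by omega) (by omega) (by omega)
                  hjn.1 hv (by rw [if_pos hij]; exact htw) (by rw [if_pos hij]; exact hqj))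
                  (le_max_right _ _)
              · have : q = jN := by omega
                subst this
                rw [hc.1] at hv
                exact absurd hv (by decide)
            rw [hconst, show n - (jN + 1) = n - 1 - jN from by omega, max_comm]
          · -- wrap case: break
            have hji : jN < i := by omega
            have hdecomp : pvPath s i = (List.range' (i + 1) (n - 1 - i) ++
                List.range' 0 jN) ++ jN :: List.range' (jN + 1) (i - jN - 1) := by
              rw [pvPath, hs]
              rw [show (List.range' 0 i : List Nat) =
                  List.range' 0 (jN + ((i - jN - 1) + 1)) by congr 1; omega,
                ← List.range'_append_1, List.range'_succ, List.append_assoc]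
              simp [show 0 + jN = jN by omega]
            have htw : (pvPath s i).takeWhile (fun q => pvSG s q ≠ "v") =
                List.range' (i + 1) (n - 1 - i) ++ List.range' 0 jN := by
              have := pvFirstSplit jN _ _ _ _ (hsplit.symm.trans hdecomp) hjtw
                (by rw [List.mem_append, List.mem_range'_1, List.mem_range'_1]; omega)
              exact this.1
            have hvj : ¬ ((i : Int) < (jN : Int)) := by exact_mod_cast not_lt.mpr (le_of_lt hji)
            rw [if_pos hv, if_neg hvj]
            have hr : List.range' i (n - i) = i :: List.range' (i + 1) (n - 1 - i) := by
              rw [show n - i = (n - 1 - i) + 1 by omega, List.range'_succ]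
            rw [hr, List.foldl_cons]
            have hstep : pvFoldStep s m i = max m (pvStars s i) := by
              unfold pvFoldStep
              rw [if_pos ⟨hgt, by rw [← hjdef]; exact hv⟩]
            rw [hstep]
            have hconst : (List.range' (i + 1) (n - 1 - i)).foldl (pvFoldStep s)
                (max m (pvStars s i)) = max m (pvStars s i) := by
              apply pvFoldStepConst
              intro q hq hc
              rw [List.mem_range'_1] at hq
              exact le_trans (pvStarsMono s n hs i q jN (by omega) (by omega) (by omega)
                hjn.1 hv (by rw [if_neg hij]; exact htw) (by rw [if_neg hij]; exact hji))
                (le_max_right _ _)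
            rw [hconst, max_comm]
        · -- no 'v' found: jN = i and nothing is ever recorded
          have hdw : (pvPath s i).dropWhile (fun q => pvSG s q ≠ "v") = [] := by
            by_contra hne
            obtain ⟨x, l2, hsplit, htwp, hxp, hdwx⟩ :=
              pvDWdecomp (fun q => pvSG s q ≠ "v") (pvPath s i) hne
            have hxj : x = jN := by rw [hjdef, pvStop, hdwx]; rfl
            apply hv
            rw [← hxj]
            simpa using hxp
          have hnoV : ∀ p, p < n → pvSG s p ≠ "v" := by
            intro p hp
            by_cases hpi : p = i
            · subst hpi; rw [hgt]; decide
            · have hmem : p ∈ pvPath s i := (pvMemPath s i (by omega) p).mpr ⟨by omega, hpi⟩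
              have := List.dropWhile_eq_nil_iff.mp hdw p hmem
              simpa using this
          have hji : jN = i := by rw [hjdef, pvStop, hdw]; rfl
          rw [if_neg hv, if_neg (by rw [hji]; exact lt_irrefl _)]
          symm
          apply pvFoldStepConst
          intro q hq hc
          rw [List.mem_range'_1] at hq
          exact absurd hc.2 (hnoV _ (by rw [← hs]; exact pvStopLt s q (by omega)))
      · rw [if_neg hgt]
        have hcast : ((i : Int) + 1) = ((i + 1 : Nat) : Int) := by push_cast; ring
        rw [hcast, ih (i + 1) m (by omega) (by omega)]
        rw [show n - i = (n - (i + 1)) + 1 by omega, List.range'_succ, List.foldl_cons]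
        have : pvFoldStep (row.take n) m i = m := by
          unfold pvFoldStep
          rw [if_neg (fun hc => hgt hc.1)]
        rw [this]
    · have : i = n := by omega
      subst this
      rw [pvOuter, if_neg (by rw [hC]; exact lt_irrefl _)]
      simp

theorem helperA_eq_ref (row : List String) (C : Int) (hC : 0 < C)
    (hlen : C ≤ (row.length : Int)) :
    getNumCoinsBetweenTurns row C = pvRef (row.take C.toNat) := by
  have hn : C.toNat ≤ row.length := by omega
  have hC' : C = ((C.toNat : Nat) : Int) := by omega
  unfold getNumCoinsBetweenTurns
  have hsp := pvOuterSpec row C C.toNat hC' hn (C.toNat + 1) 0 0 (by omega) (by omega)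
  rw [show (((0 : Nat) : Int)) = (0 : Int) from rfl] at hsp
  rw [hsp, pvRef, List.length_take, Nat.min_eq_left hn, Nat.sub_zero]

-- ---- B's helper computes the reference fold ----

theorem pvMapSGRange' (s : List String) :
    ∀ (k a : Nat), a + k ≤ s.length →
      (List.range' a k).map (pvSG s) = (s.drop a).take k := by
  intro k
  induction k with
  | zero => intro a _; simp
  | succ k ih =>
    intro a h
    rw [List.range'_succ, List.map_cons, ih (a + 1) (by omega)]
    have ha : a < s.length := by omega
    rw [List.drop_eq_getElem_cons ha, List.take_succ_cons]
    congr 1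
    simp [pvSG, List.getD, List.getElem?_eq_getElem ha]

theorem pvSegEq (s : List String) (n i : Nat) (hs : s.length = n) (hi : i < n) :
    ((s ++ s).drop (i + 1)).take (n - 1) = (pvPath s i).map (pvSG s) := by
  subst hs
  rw [List.drop_append, pvPath, List.map_append,
    pvMapSGRange' s (s.length - 1 - i) (i + 1) (by omega),
    pvMapSGRange' s i 0 (by omega)]
  rw [show i + 1 - s.length = 0 by omega, List.drop_zero,
    List.take_append]
  rw [List.take_of_length_le (l := s.drop (i + 1)) (by rw [List.length_drop]; omega),
    List.take_of_length_le (l := s.drop (i + 1)) (by rw [List.length_drop]; omega),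
    List.length_drop, show s.length - 1 - (s.length - (i + 1)) = i by omega]

theorem helperB_eq_ref (row : List String) (C : Int) (hC : 0 < C)
    (hlen : C ≤ (row.length : Int)) :
    pvMaxRunCoins row C = pvRef (row.take C.toNat) := by
  have hn : C.toNat ≤ row.length := by omega
  have hC' : C = ((C.toNat : Nat) : Int) := by omega
  set n := C.toNat with hndef
  set s := row.take n with hsdef
  have hs : s.length = n := by rw [hsdef, List.length_take]; omega
  simp only [pvMaxRunCoins]
  rw [PySem.List.slice_to row (le_of_lt hC)]
  rw [hC', PySem.List.pyRange_zero_natCast, List.foldl_map]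
  simp only [Int.toNat_natCast]
  rw [← hsdef]
  rw [pvRef, hs, List.range_eq_range']
  apply PySem.List.foldl_congr_mem
  intro b i hi
  rw [List.mem_range'_1] at hi
  have hin : i < n := by omega
  have hgeta : pvGetB s (i : Int) = pvSG s i := by
    simp [pvGetB, pvSG, PySem.List.pyGet?_natCast, List.getD]
  rw [hgeta]
  unfold pvFoldStep
  by_cases hgt : pvSG s i = ">"
  · rw [if_pos hgt]
    -- the slice is the chars along the circular path
    have hseg : PySem.List.slice (s ++ s) (some ((i : Int) + 1)) (some ((i : Int) + ((n : Nat) : Int))) =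
        (pvPath s i).map (pvSG s) := by
      rw [show ((i : Int) + 1) = ((i + 1 : Nat) : Int) from by push_cast; ring,
        show ((i : Int) + ((n : Nat) : Int)) = ((i + n : Nat) : Int) from by push_cast; ring,
        PySem.List.slice_natCast, show i + n - (i + 1) = n - 1 from by omega]
      exact pvSegEq s n i hs hin
    rw [hseg]
    by_cases hv : pvSG s (pvStop s i) = "v"
    · -- there is a 'v' on the path
      have hdw : (pvPath s i).dropWhile (fun q => pvSG s q ≠ "v") ≠ [] := by
        intro hnil
        rw [pvStop, hnil] at hv
        simp at hv
        exact absurd hv (by rw [hgt]; decide)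
      obtain ⟨x, l2, hsplit, htwp, hxp, hdwx⟩ :=
        pvDWdecomp (fun q => pvSG s q ≠ "v") (pvPath s i) hdw
      have hxv : pvSG s x = "v" := by simpa using hxp
      have hmem : ("v" : String) ∈ (pvPath s i).map (pvSG s) := by
        rw [hsplit, List.map_append, List.map_cons, hxv]
        exact List.mem_append_right _ (by simp)
      rw [if_pos (show pvSG s i = ">" ∧ pvSG s (pvStop s i) = "v" from ⟨hgt, hv⟩),
        if_pos (List.contains_iff_mem.mpr hmem)]
      congr 1
      -- compute the index of the first "v" and the star count
      set tw := (pvPath s i).takeWhile (fun q => pvSG s q ≠ "v") with htwdef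
      have hsegsplit : (pvPath s i).map (pvSG s) = tw.map (pvSG s) ++ "v" :: l2.map (pvSG s) := by
        rw [hsplit]
        rw [List.map_append, List.map_cons, hxv]
      have hvnotin : ("v" : String) ∉ tw.map (pvSG s) := by
        intro hm
        obtain ⟨q, hq, hqv⟩ := List.mem_map.mp hm
        have := htwp q hq
        simp [hqv] at this
      have hidx : PySem.List.index? ((pvPath s i).map (pvSG s)) "v" = some tw.length := by
        rw [PySem.List.index?_eq_some_iff]
        exact ⟨tw.map (pvSG s), l2.map (pvSG s), hsegsplit, by simp, hvnotin⟩
      rw [hidx]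
      simp only [Option.getD_some]
      rw [PySem.List.slice_to_natCast, hsegsplit]
      rw [show tw.length = (tw.map (pvSG s)).length from by simp, List.take_left]
      rw [PySem.List.count_eq, List.count_eq_countP, List.countP_map]
      rw [pvStars, ← htwdef]
      congr 1
    · -- no 'v' on the path: contains is false
      have hdw : (pvPath s i).dropWhile (fun q => pvSG s q ≠ "v") = [] := by
        by_contra hne
        obtain ⟨x, l2, hsplit, htwp, hxp, hdwx⟩ :=
          pvDWdecomp (fun q => pvSG s q ≠ "v") (pvPath s i) hne
        apply hv
        rw [pvStop, hdwx]
        simpa using hxp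
      have hnomem : ("v" : String) ∉ (pvPath s i).map (pvSG s) := by
        intro hm
        obtain ⟨q, hq, hqv⟩ := List.mem_map.mp hm
        have := List.dropWhile_eq_nil_iff.mp hdw q hq
        simp [hqv] at this
      rw [if_neg (show ¬ (pvSG s i = ">" ∧ pvSG s (pvStop s i) = "v") from fun hc => hv hc.2),
        if_neg (by simpa using hnomem)]
  · rw [if_neg hgt, if_neg (fun hc => hgt hc.1)]

theorem helper_eq (row : List String) (C : Int) (h : 0 < C → C ≤ (row.length : Int)) :
    getNumCoinsBetweenTurns row C = pvMaxRunCoins row C := by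
  rcases lt_or_ge 0 C with hC | hC
  · rw [helperA_eq_ref row C hC (h hC), helperB_eq_ref row C hC (h hC)]
  · have h0 : C.toNat = 0 := by omega
    unfold getNumCoinsBetweenTurns pvMaxRunCoins
    rw [h0, PySem.List.pyRange_one_eq_nil (by omega)]
    simp [pvOuter, show ¬ ((0 : Int) < C) from by omega]

-- ---- the main DP loop ----

-- proof-side names for A's loop body and for the per-row update of B's fold
def pvRowStep (C : Int) (best : Int) (row : List String) : Int :=
  max (if row.contains "*" then best + 1 else 0)
    (if row.contains ">" then
      (if row.contains "v" then best + pvMaxRunCoins row C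
       else (PySem.List.count row "*" : Int))
     else 0)

def pvStepA (C R : Int) (d : PySem.Dict Int Int) (p : Int × List String) : PySem.Dict Int Int :=
  let ind := R - p.1 - 1
  let rowChars := PySem.Dict.counter p.2
  let maxCoinsBetweenTurns := getNumCoinsBetweenTurns p.2 C
  let coinsEnter : Int :=
    if 0 < rowChars.getD ">" 0 then
      if 0 < rowChars.getD "v" 0 then d.getD (ind + 1) 0 + maxCoinsBetweenTurns
      else rowChars.getD "*" 0
    else 0
  let coinsSkip : Int :=
    if 0 < rowChars.getD "." 0 ∨ 0 < rowChars.getD "*" 0 then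
      if 0 < rowChars.getD "*" 0 then d.getD (ind + 1) 0 + 1 else 0
    else 0
  d.insert ind (max coinsSkip coinsEnter)

def pvStepB (C R : Int) (st : Int × Int) (p : Int × List String) : Int × Int :=
  let acc := pvRowStep C st.1 p.2
  (acc, if R = p.1 + 1 then acc else st.2)

theorem mainLoop (C : Int) (R : Int) :
    ∀ (L : List (List String)) (hL : ∀ row ∈ L, 0 < C → C ≤ (row.length : Int))
      (ι : Int) (d : PySem.Dict Int Int) (acc ans : Int),
      d.getD (R - ι) 0 = acc → d.getD 0 0 = ans →
      ((PySem.List.enumerate L ι).foldl (pvStepA C R) d).getD 0 0 =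
      ((PySem.List.enumerate L ι).foldl (pvStepB C R) (acc, ans)).2 := by
  intro L
  induction L with
  | nil =>
    intro hL ι d acc ans h1 h2
    simpa [PySem.List.enumerate] using h2
  | cons row L ih =>
    intro hL ι d acc ans h1 h2
    rw [PySem.List.enumerate_cons, List.foldl_cons, List.foldl_cons]
    have hposIff : ∀ v : String, (0 < ((row.count v : Nat) : Int)) ↔ row.contains v = true := by
      intro v
      rw [List.contains_iff_mem, ← List.count_pos_iff]
      exact_mod_cast Iff.rfl
    have hmct : getNumCoinsBetweenTurns row C = pvMaxRunCoins row C :=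
      helper_eq row C (hL row (by simp))
    have hstepA : pvStepA C R d (ι, row) = d.insert (R - ι - 1)
        ((pvStepB C R (acc, ans) (ι, row)).1) := by
      simp only [pvStepA, pvStepB, pvRowStep, PySem.Dict.getD_counter, hmct, PySem.List.count_eq]
      rw [show R - ι - 1 + 1 = R - ι from by ring, h1]
      congr 1
      congr 1
      · by_cases h : 0 < ((row.count "*" : Nat) : Int)
        · rw [if_pos (Or.inr h), if_pos h, if_pos ((hposIff "*").mp h)]
        · rw [if_neg (fun hc => h ((hposIff "*").mpr hc))]
          by_cases hdot : (0 < ((row.count "." : Nat) : Int) ∨ 0 < ((row.count "*" : Nat) : Int))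
          · rw [if_pos hdot, if_neg h]
          · rw [if_neg hdot]
      · by_cases h : 0 < ((row.count ">" : Nat) : Int)
        · rw [if_pos h, if_pos ((hposIff ">").mp h)]
          by_cases hv : 0 < ((row.count "v" : Nat) : Int)
          · rw [if_pos hv, if_pos ((hposIff "v").mp hv)]
          · rw [if_neg hv, if_neg (fun hc => hv ((hposIff "v").mpr hc))]
        · rw [if_neg h, if_neg (fun hc => h ((hposIff ">").mpr hc))]
    have hstepB : pvStepB C R (acc, ans) (ι, row) = ((pvStepB C R (acc, ans) (ι, row)).1,
        if R = ι + 1 then (pvStepB C R (acc, ans) (ι, row)).1 else ans) := by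
      simp only [pvStepB]
    rw [hstepA, hstepB]
    apply ih (fun r hr => hL r (by simp [hr])) (ι + 1) _ _ _ ?_ ?_
    · rw [show R - (ι + 1) = R - ι - 1 from by ring]
      rw [PySem.Dict.getD_eq_get?_getD, PySem.Dict.get?_insert_self]
      rfl
    · by_cases h0 : R - ι - 1 = 0
      · rw [if_pos (show R = ι + 1 from by omega), ← h0]
        rw [PySem.Dict.getD_eq_get?_getD, PySem.Dict.get?_insert_self]
        rfl
      · rw [if_neg (show ¬ R = ι + 1 from fun he => h0 (by omega))]
        rw [PySem.Dict.getD_eq_get?_getD, PySem.Dict.get?_insert_of_ne]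
        · rw [← PySem.Dict.getD_eq_get?_getD]
          exact h2
        · omega

-- the guarded pair fold equals the plain fold over the first R - ι rows (else the stale answer)
theorem pvPairFold (C R : Int) :
    ∀ (L : List (List String)) (ι acc ans : Int),
      ((PySem.List.enumerate L ι).foldl (pvStepB C R) (acc, ans)).2 =
      if ι < R ∧ R ≤ ι + (L.length : Int) then
        (L.take (R - ι).toNat).foldl (pvRowStep C) acc
      else ans := by
  intro L
  induction L with
  | nil =>
    intro ι acc ans
    simp only [List.length_nil, Nat.cast_zero, add_zero]
    rw [if_neg (by omega)]
    simp [PySem.List.enumerate]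
  | cons row L ih =>
    intro ι acc ans
    rw [PySem.List.enumerate_cons, List.foldl_cons,
      show pvStepB C R (acc, ans) (ι, row) =
        (pvRowStep C acc row, if R = ι + 1 then pvRowStep C acc row else ans) from rfl,
      ih]
    simp only [List.length_cons, Nat.cast_add, Nat.cast_one]
    by_cases h1 : ι + 1 < R ∧ R ≤ ι + 1 + (L.length : Int)
    · rw [if_pos h1, if_pos (show ι < R ∧ R ≤ ι + ((L.length : Int) + 1) from by omega)]
      obtain ⟨k, hk⟩ : ∃ k : Nat, (R - ι).toNat = k + 1 := ⟨(R - ι).toNat - 1, by omega⟩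
      rw [hk, List.take_succ_cons, List.foldl_cons,
        show (R - (ι + 1)).toNat = k from by omega]
    · rw [if_neg h1]
      by_cases h2 : R = ι + 1
      · rw [if_pos h2, if_pos (show ι < R ∧ R ≤ ι + ((L.length : Int) + 1) from by omega),
          show (R - ι).toNat = 1 from by omega]
        simp
      · rw [if_neg h2,
          if_neg (show ¬ (ι < R ∧ R ≤ ι + ((L.length : Int) + 1)) from by omega)]

-- ===== VERDICT (by name: the statement is the Claim_ definition above) =====
theorem getMaxCollectableCoins_spec : Claim_equal_getMaxCollectableCoins := by
  intro R C G _hDom hPre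
  unfold Spec_getMaxCollectableCoins
  have hA : getMaxCollectableCoins R C G =
      ((PySem.List.enumerate G.reverse 0).foldl (pvStepA C R) PySem.Dict.empty).getD 0 0 := by
    unfold getMaxCollectableCoins
    rw [PySem.List.slice?_none_none_neg_one]
    rfl
  have hB : getMaxCollectableCoins_alt R C G =
      if R ≤ 0 ∨ (G.length : Int) < R then 0
      else ((PySem.List.slice G (some ((G.length : Int) - R)) none).reverse).foldl
        (pvRowStep C) 0 := by
    unfold getMaxCollectableCoins_alt
    rfl
  rw [hA, hB,
    mainLoop C R G.reverse (fun row hrow => hPre row (List.mem_reverse.mp hrow)) 0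
      PySem.Dict.empty 0 0 (by simp [pysem]) (by simp [pysem]),
    pvPairFold]
  by_cases h : R ≤ 0 ∨ (G.length : Int) < R
  · rw [if_pos h, if_neg (by simp only [List.length_reverse]; omega)]
  · rw [if_neg h,
      if_pos (by simp only [List.length_reverse]; constructor <;> omega),
      PySem.List.slice_from G (by omega : (0 : Int) ≤ (G.length : Int) - R),
      List.reverse_drop,
      show G.length - ((G.length : Int) - R).toNat = (R - 0).toNat from by omega]
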